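-- pv_equiv track=rewrite | github.com/yikedouer/NLU_Training | processors/preprocessor.py | merge_continue
-- ===== SOURCE A (Python) =====
-- def merge_continue(context_list, role_list):
--     context = context_list
--     role = role_list
--     if len(role) == 0:
--         return [], []
--     pre_src, pre_content = role[0], context[0]
--     merged_src_list, merged_content_list = [pre_src], [pre_content]
--     for src, content in zip(role[1:], context[1:]):
--         if pre_src == src:
--             merge_content = f"{merged_content_list[-1]}, {content}"
--             merged_content_list[-1] = merge_content
--         else:
--             merged_content_list.append(content)
--             merged_src_list.append(src)
--         pre_src = src
--
--     return merged_content_list, merged_src_list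
-- ===== SOURCE B (Python) =====
-- from itertools import groupby
--
-- def merge_continue(context_list, role_list):
--     merged_content_list, merged_src_list = [], []
--     for role_value, group in groupby(zip(role_list, context_list), key=lambda pair: pair[0]):
--         items = [content for _, content in group]
--         if len(items) == 1:
--             merged_content_list.append(items[0])
--         else:
--             merged_content_list.append(", ".join(str(c) for c in items))
--         merged_src_list.append(role_value)
--     return merged_content_list, merged_src_list
-- ===== Notes on version B (the rewrite author's own statement) =====
-- stated objective: idiomatic
-- what changed: Replaces A's stateful loop that mutates the last slot of the output list (tracking pre_src and rewriting merged_content_list[-1]) with itertools.groupby over zip(role_list, context_list): each run of consecutive equal roles is collected and joined once.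
import Mathlib
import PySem

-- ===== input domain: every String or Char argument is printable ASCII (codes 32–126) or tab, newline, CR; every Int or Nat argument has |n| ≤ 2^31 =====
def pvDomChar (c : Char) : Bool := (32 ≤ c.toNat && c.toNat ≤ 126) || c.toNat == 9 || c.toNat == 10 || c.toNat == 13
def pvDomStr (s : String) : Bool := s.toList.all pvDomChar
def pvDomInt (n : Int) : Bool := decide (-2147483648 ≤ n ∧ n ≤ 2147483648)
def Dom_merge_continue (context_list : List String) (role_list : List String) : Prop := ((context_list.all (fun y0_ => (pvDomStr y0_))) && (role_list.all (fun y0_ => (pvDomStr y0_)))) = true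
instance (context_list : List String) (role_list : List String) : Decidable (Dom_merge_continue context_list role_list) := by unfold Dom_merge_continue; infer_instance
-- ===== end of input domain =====

-- B replaces A's mutate-the-last-slot loop by grouping consecutive equal roles and joining each group once (idiomatic, itertools.groupby); same cost, return values only.

-- ===== PORT A =====
-- the loop: state (pre_src, merged_content_list, merged_src_list), over zip(role[1:], context[1:]);
-- merged_content_list[-1] = f"{merged_content_list[-1]}, {content}" becomes dropLast ++ [last ++ ", " ++ content]
def mcLoop : String → List String → List String → List (String × String) → List String × List String
  | _, contents, srcs, [] => (contents, srcs)
  | pre, contents, srcs, (src, content) :: rest =>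
    if pre == src then
      mcLoop src (contents.dropLast ++ [(contents.getLastD "") ++ ", " ++ content]) srcs rest
    else
      mcLoop src (contents ++ [content]) (srcs ++ [src]) rest

def merge_continue (context_list : List String) (role_list : List String) : List String × List String :=
  match role_list, context_list with
  | [], _ => ([], [])
  | r :: rtail, c :: ctail => mcLoop r [c] [r] (rtail.zip ctail)
  | _ :: _, [] => ([], [])  -- Python A raises IndexError here (context[0]); excluded by Pre_

-- ===== PORT B =====
-- itertools.groupby over zip(role_list, context_list), key = first component:
-- consecutive runs of equal role, each with its list of contents
def mcGroupsGo : String → List String → List (String × String) → List (String × List String)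
  | r, acc, [] => [(r, acc.reverse)]
  | r, acc, (s, c) :: rest =>
    if s == r then mcGroupsGo r (c :: acc) rest
    else (r, acc.reverse) :: mcGroupsGo s [c] rest

def mcGroups : List (String × String) → List (String × List String)
  | [] => []
  | (r, c) :: rest => mcGroupsGo r [c] rest

-- items[0] if len(items)==1 else ", ".join(items); ", ".join ported by hand (exact for str items: fold with separator)
def mcJoin : List String → String
  | [x] => x
  | items => match items with
    | [] => ""
    | x :: xs => xs.foldl (fun acc y => acc ++ ", " ++ y) x

def merge_continue_alt (context_list : List String) (role_list : List String) : List String × List String :=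
  (mcGroups (role_list.zip context_list)).foldl
    (fun acc g => (acc.1 ++ [mcJoin g.2], acc.2 ++ [g.1])) ([], [])

-- ===== PRECONDITION & SPEC =====
-- Pre_ excludes exactly the inputs where A raises IndexError: role_list nonempty with context_list empty (context[0] out of range).
def Pre_merge_continue (context_list : List String) (role_list : List String) : Prop :=
  role_list = [] ∨ context_list ≠ []
instance (context_list : List String) (role_list : List String) : Decidable (Pre_merge_continue context_list role_list) := by unfold Pre_merge_continue; infer_instance
def pvWitness_merge_continue : List String × List String := (["a", "b"], ["r", "r"])

def Spec_merge_continue (context_list : List String) (role_list : List String) (out : List String × List String) : Prop := out = merge_continue_alt context_list role_list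
instance (context_list : List String) (role_list : List String) (out : List String × List String) : Decidable (Spec_merge_continue context_list role_list out) := by unfold Spec_merge_continue; infer_instance

-- ===== CLAIM (what is proved, stated in full; the proofs are below) =====
def Claim_equal_merge_continue : Prop := ∀ (context_list : List String) (role_list : List String), Dom_merge_continue context_list role_list → Pre_merge_continue context_list role_list → Spec_merge_continue context_list role_list (merge_continue context_list role_list)

-- ===== LEMMAS AND PROOFS =====

lemma mcGroups_nil : mcGroups [] = [] := rfl

-- the single-pass accumulator run of groupby, characterised by takeWhile/dropWhile
lemma mcGroupsGo_eq (pairs : List (String × String)) :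
    ∀ (r : String) (acc : List String),
    mcGroupsGo r acc pairs
      = (r, acc.reverse ++ (pairs.takeWhile (fun p => p.1 == r)).map Prod.snd)
          :: mcGroups (pairs.dropWhile (fun p => p.1 == r)) := by
  induction pairs with
  | nil => intro r acc; simp [mcGroupsGo, mcGroups_nil]
  | cons p rest ih =>
    intro r acc
    obtain ⟨s, c⟩ := p
    by_cases h : s = r
    · subst h
      simp only [mcGroupsGo, beq_self_eq_true, if_true, List.takeWhile_cons,
        List.dropWhile_cons, ih]
      simp
    · have hb : (s == r) = false := by simp [h]
      simp [mcGroupsGo, hb, mcGroups]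

lemma mcGroups_cons (r c : String) (rest : List (String × String)) :
    mcGroups ((r, c) :: rest)
      = (r, c :: (rest.takeWhile (fun p => p.1 == r)).map Prod.snd)
          :: mcGroups (rest.dropWhile (fun p => p.1 == r)) := by
  show mcGroupsGo r [c] rest = _
  rw [mcGroupsGo_eq]
  rfl


lemma mcJoin_cons (c : String) (l : List String) :
    mcJoin (c :: l) = l.foldl (fun acc y => acc ++ ", " ++ y) c := by
  cases l <;> simp [mcJoin]

lemma mcFold_acc (gs : List (String × List String)) (cs ss : List String) :
    gs.foldl (fun acc g => (acc.1 ++ [mcJoin g.2], acc.2 ++ [g.1])) (cs, ss)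
      = (cs ++ gs.map (fun g => mcJoin g.2), ss ++ gs.map Prod.fst) := by
  induction gs generalizing cs ss with
  | nil => simp
  | cons g gs ih => simp [List.foldl_cons, ih]

-- the invariant of A's loop, expressed against B's groups
lemma mcLoop_eq (pairs : List (String × String)) :
    ∀ (r c : String) (cs ss : List String),
    mcLoop r (cs ++ [c]) ss pairs
      = (cs ++ [(pairs.takeWhile (fun p => p.1 == r)).foldl (fun acc p => acc ++ ", " ++ p.2) c]
            ++ (mcGroups (pairs.dropWhile (fun p => p.1 == r))).map (fun g => mcJoin g.2),
         ss ++ (mcGroups (pairs.dropWhile (fun p => p.1 == r))).map Prod.fst) := by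
  induction pairs with
  | nil => intro r c cs ss; simp [mcLoop, mcGroups_nil]
  | cons p rest ih =>
    intro r c cs ss
    obtain ⟨s, ct⟩ := p
    by_cases h : r = s
    · subst h
      simp only [mcLoop, beq_self_eq_true, if_true, List.dropLast_concat,
        List.getLastD_concat, List.takeWhile_cons, List.dropWhile_cons]
      rw [ih r (c ++ ", " ++ ct) cs ss]
      simp
    · have hb : (r == s) = false := by simp [h]
      have hb' : (s == r) = false := by simp [Ne.symm h]
      simp only [mcLoop, hb, Bool.false_eq_true, if_false, List.takeWhile_cons, List.dropWhile_cons, hb']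
      rw [show cs ++ [c] ++ [ct] = (cs ++ [c]) ++ [ct] by simp, ih s ct (cs ++ [c]) (ss ++ [s])]
      rw [mcGroups_cons]
      simp [mcJoin_cons, List.foldl_map]

-- ===== VERDICT (by name: the statement is the Claim_ definition above) =====
theorem merge_continue_spec : Claim_equal_merge_continue := by
  intro context_list role_list _ hpre
  unfold Spec_merge_continue
  match role_list, context_list with
  | [], ctx => simp [merge_continue, merge_continue_alt, mcGroups_nil]
  | r :: rtail, [] =>
    exact absurd hpre (by simp [Pre_merge_continue])
  | r :: rtail, c :: ctail =>
    show mcLoop r ([] ++ [c]) [r] (rtail.zip ctail) = _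
    rw [mcLoop_eq]
    unfold merge_continue_alt
    rw [mcFold_acc]
    rw [List.zip_cons_cons, mcGroups_cons]
    simp [mcJoin_cons, List.foldl_map]
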